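-- pv_equiv track=rewrite | github.com/navalpablo/dicom_tools | UID_fixer.py | is_valid_uid
-- ===== SOURCE A (Python) =====
-- def is_valid_uid(uid):
--     """
--     Check if a UID is compliant with DICOM rules:
--       - Non-empty string.
--       - Total length ≤ 64 characters.
--       - Contains only digits and periods.
--       - Each component (separated by periods) is a valid integer with no leading zeros (unless the component is "0").
--     """
--     if not isinstance(uid, str) or not uid:
--         return False
--     if len(uid) > 64:
--         return False
--     components = uid.split('.')
--     for comp in components:
--         if not comp.isdigit():
--             return False
--         if len(comp) > 1 and comp.startswith('0'):
--             return False
--     return True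
-- ===== SOURCE B (Python) =====
-- def is_valid_uid(uid):
--     """Single-pass validation: scan characters once, tracking the current
--     component's length and whether it started with '0', instead of
--     materialising the list of components via split('.')."""
--     if not isinstance(uid, str) or not uid:
--         return False
--     if len(uid) > 64:
--         return False
--     comp_len = 0
--     leading_zero = False
--     for ch in uid:
--         if ch == '.':
--             if comp_len == 0 or (leading_zero and comp_len > 1):
--                 return False
--             comp_len = 0
--             leading_zero = False
--         elif ch.isdigit():
--             if comp_len == 0:
--                 leading_zero = (ch == '0')
--             comp_len += 1
--         else:
--             return False
--     return comp_len > 0 and not (leading_zero and comp_len > 1)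
-- ===== Notes on version B (the rewrite author's own statement) =====
-- stated objective: alternative
-- what changed: B validates the UID in a single character pass maintaining the current component's length and a leading-zero flag, instead of materialising the list of components with str.split and checking each with isdigit/startswith.
import Mathlib
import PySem

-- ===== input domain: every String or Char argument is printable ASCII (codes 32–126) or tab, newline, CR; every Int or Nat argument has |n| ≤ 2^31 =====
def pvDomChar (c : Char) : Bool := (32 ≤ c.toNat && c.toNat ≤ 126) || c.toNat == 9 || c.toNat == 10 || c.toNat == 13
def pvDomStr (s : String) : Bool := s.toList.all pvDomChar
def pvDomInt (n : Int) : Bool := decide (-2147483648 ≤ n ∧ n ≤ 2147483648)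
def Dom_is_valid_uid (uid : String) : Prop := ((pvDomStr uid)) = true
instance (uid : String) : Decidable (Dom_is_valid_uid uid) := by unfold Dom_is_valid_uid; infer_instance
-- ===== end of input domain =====

-- B validates in a single pass over the characters, tracking the current component's
-- length and leading-zero flag, instead of splitting on periods into a list of components.

-- ===== PORT A =====
def is_valid_uid (uid : String) : Bool :=
  if uid.toList.isEmpty then false          -- 'not isinstance(uid, str) or not uid' (always a str here)
  else if decide (64 < PySem.Chars.len uid.toList) then false
  else
    -- 'for comp in uid.split('.'): …' with two early 'return False's
    (PySem.Chars.splitOn uid.toList ['.']).all (fun comp =>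
      if !PySem.Chars.strIsdigit comp then false
      else if decide (1 < comp.length) && PySem.Chars.startswith comp ['0'] then false
      else true)

-- ===== PORT B =====
-- the for-loop of Source B: state = (current component length, leading-zero flag);
-- each 'return False' becomes returning false.
def pvAltLoop : List Char → Nat → Bool → Bool
  | [], compLen, leadZero =>
      decide (0 < compLen) && !(leadZero && decide (1 < compLen))
  | c :: rest, compLen, leadZero =>
      if c = '.' then
        if compLen == 0 || (leadZero && decide (1 < compLen)) then false
        else pvAltLoop rest 0 false
      else if PySem.Chars.isdigit c then
        pvAltLoop rest (compLen + 1) (if compLen == 0 then c == '0' else leadZero)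
      else false

def is_valid_uid_alt (uid : String) : Bool :=
  if uid.toList.isEmpty then false
  else if decide (64 < PySem.Chars.len uid.toList) then false
  else pvAltLoop uid.toList 0 false

-- ===== PRECONDITION & SPEC =====
def Spec_is_valid_uid (uid : String) (out : Bool) : Prop := out = is_valid_uid_alt uid
instance (uid : String) (out : Bool) : Decidable (Spec_is_valid_uid uid out) := by unfold Spec_is_valid_uid; infer_instance

-- ===== CLAIM (what is proved, stated in full; the proofs are below) =====
def Claim_equal_is_valid_uid : Prop := ∀ (uid : String), Dom_is_valid_uid uid → Spec_is_valid_uid uid (is_valid_uid uid)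

-- ===== LEMMAS AND PROOFS =====

-- simple structural recursion computing splitOn s ['.'] (cur = reversed current chunk)
def pvSp : List Char → List Char → List (List Char)
  | [], cur => [cur.reverse]
  | c :: rest, cur => if c = '.' then cur.reverse :: pvSp rest [] else pvSp rest (c :: cur)

-- A's per-component check, named
def pvChk (comp : List Char) : Bool :=
  if !PySem.Chars.strIsdigit comp then false
  else if decide (1 < comp.length) && PySem.Chars.startswith comp ['0'] then false
  else true

lemma pv_prefix_dot (c : Char) (rest : List Char) :
    List.isPrefixOf ['.'] (c :: rest) = (c == '.') := by
  cases h : c == '.' <;> simp_all [List.isPrefixOf, BEq.comm]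

lemma pv_go_eq_sp (fuel : Nat) : ∀ (l cur : List Char) (acc : List (List Char)),
    l.length < fuel →
    PySem.Chars.splitOn.go ['.'] fuel l cur acc = acc.reverse ++ pvSp l cur := by
  induction fuel with
  | zero => intro l cur acc h; omega
  | succ n ih =>
    intro l cur acc h
    cases l with
    | nil => simp [PySem.Chars.splitOn.go, pvSp]
    | cons c rest =>
      simp only [PySem.Chars.splitOn.go, pv_prefix_dot]
      by_cases hc : c = '.'
      · subst hc
        rw [if_pos (by simp)]
        simp only [List.length_singleton, List.drop_one, List.tail_cons]
        rw [ih rest [] (cur.reverse :: acc) (by simp at h ⊢; omega)]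
        simp [pvSp]
      · rw [if_neg (by simp [hc])]
        rw [ih rest (c :: cur) acc (by simp at h ⊢; omega)]
        simp [pvSp, hc]

lemma pv_splitOn_dot (s : List Char) :
    PySem.Chars.splitOn s ['.'] = pvSp s [] := by
  unfold PySem.Chars.splitOn
  rw [pv_go_eq_sp (s.length + 1) s [] [] (by omega)]
  simp

lemma pv_startswith_zero (b : Char) (bs : List Char) :
    PySem.Chars.startswith (b :: bs) ['0'] = (b == '0') := by
  cases h : b == '0' <;> simp_all [PySem.Chars.startswith, List.isPrefixOf, BEq.comm]

-- A's check on a chunk of digits, in terms of B's loop state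
lemma pv_chk_digits (cur : List Char) (hdig : ∀ x ∈ cur, PySem.Chars.isdigit x = true) :
    pvChk cur.reverse =
      (decide (0 < cur.length) && !((cur.getLast? == some '0') && decide (1 < cur.length))) := by
  cases cur with
  | nil => simp [pvChk, PySem.Chars.strIsdigit]
  | cons a as =>
    have hall : PySem.Chars.strIsdigit (a :: as).reverse = true := by
      simp only [PySem.Chars.strIsdigit, List.isEmpty_reverse, List.all_reverse,
        List.isEmpty_cons, Bool.not_false, Bool.true_and]
      exact List.all_eq_true.mpr hdig
    have hsw : PySem.Chars.startswith (a :: as).reverse ['0'] =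
        ((a :: as).getLast? == some '0') := by
      have h1 : (a :: as).getLast? = (a :: as).reverse.head? := List.head?_reverse.symm
      rcases hrev : (a :: as).reverse with _ | ⟨b, bs⟩
      · simp at hrev
      · rw [pv_startswith_zero, h1, hrev]
        cases h : b == '0' <;> simp_all
    simp only [pvChk, hall, Bool.not_true, Bool.false_eq_true, if_false, hsw,
      List.length_reverse, List.length_cons]
    cases h0 : ((a :: as).getLast? == some '0') <;>
      cases h1 : decide (1 < as.length + 1) <;> simp_all

lemma pv_chk_bad (cur : List Char) (x : Char) (hx : x ∈ cur)
    (hxd : PySem.Chars.isdigit x = false) : pvChk cur.reverse = false := by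
  have h : PySem.Chars.strIsdigit cur.reverse = false := by
    have : cur.all PySem.Chars.isdigit = false := by
      rw [List.all_eq_false]; exact ⟨x, hx, by simp [hxd]⟩
    simp [PySem.Chars.strIsdigit, this]
  simp [pvChk, h]

-- a non-digit already in the pending chunk makes A's check fail
lemma pv_bad (cs : List Char) : ∀ (cur : List Char) (x : Char), x ∈ cur →
    PySem.Chars.isdigit x = false → (pvSp cs cur).all pvChk = false := by
  induction cs with
  | nil =>
    intro cur x hx hxd
    simp only [pvSp, List.all_cons, List.all_nil, Bool.and_true]
    exact pv_chk_bad cur x hx hxd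
  | cons c rest ih =>
    intro cur x hx hxd
    by_cases hc : c = '.'
    · subst hc
      simp only [pvSp, if_true, List.all_cons]
      rw [pv_chk_bad cur x hx hxd, Bool.false_and]
    · simp only [pvSp, if_neg hc]
      exact ih (c :: cur) x (by simp [hx]) hxd

-- main invariant: B's loop equals A's check over the split of the rest, given the
-- pending reversed chunk cur consists of digits
lemma pv_main (cs : List Char) : ∀ (cur : List Char),
    (∀ x ∈ cur, PySem.Chars.isdigit x = true) →
    pvAltLoop cs cur.length (cur.getLast? == some '0') = (pvSp cs cur).all pvChk := by
  induction cs with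
  | nil =>
    intro cur hdig
    simp only [pvAltLoop, pvSp, List.all_cons, List.all_nil, Bool.and_true]
    exact (pv_chk_digits cur hdig).symm
  | cons c rest ih =>
    intro cur hdig
    by_cases hc : c = '.'
    · subst hc
      simp only [pvAltLoop, pvSp, if_true, List.all_cons]
      have ihr := ih [] (by simp)
      simp only [List.length_nil, List.getLast?_nil] at ihr
      rw [show ((none : Option Char) == some '0') = false from rfl] at ihr
      rw [pv_chk_digits cur hdig, ← ihr]
      cases hfail : (cur.length == 0 || ((cur.getLast? == some '0') && decide (1 < cur.length)))
      · simp only [Bool.or_eq_false_iff] at hfail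
        obtain ⟨h1, h2⟩ := hfail
        have : decide (0 < cur.length) = true := by
          simp_all [List.length_pos_iff]
        simp [this, h2]
      · rw [if_pos rfl]
        rcases Bool.or_eq_true_iff.mp hfail with h | h
        · have : decide (0 < cur.length) = false := by simp_all
          simp [this]
        · simp [h]
    · by_cases hd : PySem.Chars.isdigit c = true
      · simp only [pvAltLoop, if_neg hc, hd, if_true, pvSp]
        have hdig' : ∀ x ∈ c :: cur, PySem.Chars.isdigit x = true := by
          intro x hx
          rcases List.mem_cons.mp hx with rfl | hx
          · exact hd
          · exact hdig x hx
        have ihr := ih (c :: cur) hdig'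
        simp only [List.length_cons] at ihr
        have hlast : ((c :: cur).getLast? == some '0') =
            (if cur.length == 0 then c == '0' else (cur.getLast? == some '0')) := by
          cases cur with
          | nil => simp
          | cons a as => simp [List.getLast?_cons_cons]
        rw [← hlast, ihr]
      · simp only [Bool.not_eq_true] at hd
        simp only [pvAltLoop, if_neg hc, hd, Bool.false_eq_true, if_false, pvSp]
        exact (pv_bad rest (c :: cur) c (by simp) hd).symm

-- ===== VERDICT (by name: the statement is the Claim_ definition above) =====
theorem is_valid_uid_spec : Claim_equal_is_valid_uid := by
  intro uid _
  unfold Spec_is_valid_uid is_valid_uid is_valid_uid_alt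
  by_cases he : uid.toList.isEmpty
  · simp [he]
  · simp only [if_neg he]
    by_cases hl : decide (64 < PySem.Chars.len uid.toList) = true
    · rw [if_pos hl, if_pos hl]
    · rw [if_neg hl, if_neg hl]
      rw [pv_splitOn_dot]
      have h := pv_main uid.toList [] (by simp)
      simp only [List.length_nil, List.getLast?_nil] at h
      rw [show ((none : Option Char) == some '0') = false from rfl] at h
      exact h.symm
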